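-- pv_equiv track=rewrite | github.com/Kushagrasahh/python | minimum_index_character.py | sttr
-- ===== SOURCE A (Python) =====
-- def sttr(s,r):
--     h={}
--     var=max(len(s),len(r))
--     u=var+1
--     v=''
--     for i in range(len(s)):
--         if s[i] not in h:
--             h[s[i]]=i
--     for c in r:
--         if c  in h.keys() and h[c]<u:
--             v=c
--             u=h[c]
--     if v:
--         return v
--     else:
--         return '$'
-- ===== SOURCE B (Python) =====
-- def sttr(s, r):
--     rset = set(r)
--     for c in s:
--         if c in rset:
--             return c
--     return '$'
-- ===== Notes on version B (the rewrite author's own statement) =====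
-- stated objective: simpler
-- what changed: Replaces the first-occurrence-index dict over s plus a running-minimum scan of r with a single early-exit forward scan of s against a membership set of r (the first char of s that occurs in r is exactly the char of r with minimal index in s).
import Mathlib
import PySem

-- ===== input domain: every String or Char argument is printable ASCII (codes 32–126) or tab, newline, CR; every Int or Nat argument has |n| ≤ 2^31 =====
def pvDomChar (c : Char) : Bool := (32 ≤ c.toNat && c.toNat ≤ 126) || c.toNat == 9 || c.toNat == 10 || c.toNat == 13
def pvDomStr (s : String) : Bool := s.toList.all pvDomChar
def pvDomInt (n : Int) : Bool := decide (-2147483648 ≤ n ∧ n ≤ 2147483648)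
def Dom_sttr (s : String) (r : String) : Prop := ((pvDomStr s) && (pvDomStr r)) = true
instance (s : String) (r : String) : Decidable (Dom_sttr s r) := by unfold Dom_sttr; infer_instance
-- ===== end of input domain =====

-- B replaces A's first-occurrence-index dict over s plus running-minimum scan of r
-- by a single early-exit scan of s against a membership set of r (simpler).

-- ===== PORT A =====
def sttr (s : String) (r : String) : String :=
  -- h = {}; for i in range(len(s)): if s[i] not in h: h[s[i]] = i
  let h : PySem.Dict Char Int :=
    (PySem.List.enumerate s.toList).foldl
      (fun h p => if h.contains p.2 then h else h.insert p.2 p.1)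
      PySem.Dict.empty
  let var : Int := max (PySem.Str.len s) (PySem.Str.len r)
  let u0 : Int := var + 1
  -- v = ''; for c in r: if c in h.keys() and h[c] < u: v = c; u = h[c]
  let p : String × Int :=
    r.toList.foldl
      (fun (p : String × Int) c =>
        match h.get? c with
        | some k => if k < p.2 then (String.ofList [c], k) else p
        | none => p)
      ("", u0)
  -- if v: return v else: return '$'
  if p.1 ≠ "" then p.1 else "$"

-- ===== PORT B =====
def sttr_alt (s : String) (r : String) : String :=
  let rset : PySem.Set Char := PySem.Set.ofList r.toList
  -- for c in s: if c in rset: return c; return '$'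
  match s.toList.find? (fun c => PySem.Set.contains rset c) with
  | some c => String.ofList [c]
  | none => "$"

-- ===== PRECONDITION & SPEC =====
def Spec_sttr (s : String) (r : String) (out : String) : Prop := out = sttr_alt s r
instance (s : String) (r : String) (out : String) : Decidable (Spec_sttr s r out) := by unfold Spec_sttr; infer_instance

-- ===== CLAIM (what is proved, stated in full; the proofs are below) =====
def Claim_equal_sttr : Prop := ∀ (s : String) (r : String), Dom_sttr s r → Spec_sttr s r (sttr s r)

-- ===== LEMMAS AND PROOFS =====

-- A's first loop builds the dict of FIRST occurrence indices (offset n).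
theorem pvFirstOcc (ls : List Char) :
    ∀ (n : Int) (d : PySem.Dict Char Int) (c : Char),
      ((PySem.List.enumerate ls n).foldl
        (fun h p => if h.contains p.2 then h else h.insert p.2 p.1) d).get? c
      = match d.get? c with
        | some v => some v
        | none => (PySem.List.index? ls c).map (fun k => n + (k : Int)) := by
  induction ls with
  | nil => intro n d c; simp [PySem.List.enumerate_nil]; cases d.get? c <;> simp
  | cons x ls ih =>
    intro n d c
    rw [PySem.List.enumerate_cons]
    simp only [List.foldl_cons, ih]
    by_cases hxc : x = c
    · subst hxc
      cases hd : d.get? x with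
      | some v =>
        have hc : d.contains x = true := by
          rw [PySem.Dict.contains_eq_isSome_get?, hd]; rfl
        simp [hc, hd]
      | none =>
        have hc : d.contains x = false := by
          rw [PySem.Dict.contains_eq_isSome_get?, hd]; rfl
        have hg : (if d.contains x = true then d else d.insert x n).get? x = some n := by
          simp [hc, PySem.Dict.get?_insert_self]
        rw [hg, PySem.List.index?_cons_self]
        simp
    · have hget : (if d.contains x = true then d else d.insert x n).get? c = d.get? c := by
        split
        · rfl
        · exact PySem.Dict.get?_insert_of_ne d n (fun h => hxc h.symm)
      rw [hget]
      cases hd : d.get? c with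
      | some v => rfl
      | none =>
        rw [PySem.List.index?_cons_of_ne ls hxc]
        cases h2 : PySem.List.index? ls c <;> simp <;> ring

-- A's second loop with the dict lookup replaced by its value (index? into ls).
def pvFold (ls lr : List Char) (p0 : String × Int) : String × Int :=
  lr.foldl
    (fun (p : String × Int) c =>
      match PySem.List.index? ls c with
      | some k => if (k : Int) < p.2 then (String.ofList [c], (k : Int)) else p
      | none => p)
    p0

theorem pvFold_cons (ls : List Char) (c : Char) (lr : List Char) (p0 : String × Int) :
    pvFold ls (c :: lr) p0
      = pvFold ls lr (match PySem.List.index? ls c with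
          | some k => if (k : Int) < p0.2 then (String.ofList [c], (k : Int)) else p0
          | none => p0) := rfl

-- A's loop equals pvFold.
theorem pvFoldA (ls : List Char) (lr : List Char) :
    ∀ (p0 : String × Int),
      lr.foldl
        (fun (p : String × Int) c =>
          match ((PySem.List.enumerate ls).foldl
              (fun h p => if h.contains p.2 then h else h.insert p.2 p.1)
              PySem.Dict.empty).get? c with
          | some k => if k < p.2 then (String.ofList [c], k) else p
          | none => p) p0
      = pvFold ls lr p0 := by
  induction lr with
  | nil => intro p0; rfl
  | cons c lr ih =>
    intro p0
    simp only [List.foldl_cons]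
    rw [ih, pvFold_cons]
    congr 1
    rw [pvFirstOcc]
    simp only [PySem.Dict.get?_empty]
    cases h : PySem.List.index? ls c <;> simp

-- the running minimum never increases
theorem pvFold_le (ls : List Char) (lr : List Char) :
    ∀ (p0 : String × Int), (pvFold ls lr p0).2 ≤ p0.2 := by
  induction lr with
  | nil => intro p0; exact le_refl _
  | cons c lr ih =>
    intro p0
    rw [pvFold_cons]
    cases h : PySem.List.index? ls c with
    | some k =>
      by_cases hk : (k : Int) < p0.2
      · simp only [if_pos hk]
        exact le_trans (ih _) (le_of_lt hk)
      · simp only [if_neg hk]; exact ih _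
    | none => exact ih _

-- the result is the start state or a genuine candidate
theorem pvFold_cases (ls : List Char) (lr : List Char) :
    ∀ (p0 : String × Int),
      pvFold ls lr p0 = p0 ∨
      ∃ c k, c ∈ lr ∧ PySem.List.index? ls c = some k ∧
        pvFold ls lr p0 = (String.ofList [c], (k : Int)) ∧ (k : Int) < p0.2 := by
  induction lr with
  | nil => intro p0; exact Or.inl rfl
  | cons c lr ih =>
    intro p0
    rw [pvFold_cons]
    cases h : PySem.List.index? ls c with
    | some k =>
      by_cases hk : (k : Int) < p0.2
      · simp only [if_pos hk]
        rcases ih (String.ofList [c], (k : Int)) with h1 | ⟨c', k', hc', hi', he', hl'⟩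
        · exact Or.inr ⟨c, k, List.mem_cons_self, h, h1, hk⟩
        · exact Or.inr ⟨c', k', List.mem_cons_of_mem _ hc', hi', he', lt_trans hl' hk⟩
      · simp only [if_neg hk]
        rcases ih p0 with h1 | ⟨c', k', hc', hi', he', hl'⟩
        · exact Or.inl h1
        · exact Or.inr ⟨c', k', List.mem_cons_of_mem _ hc', hi', he', hl'⟩
    | none =>
      rcases ih p0 with h1 | ⟨c', k', hc', hi', he', hl'⟩
      · exact Or.inl h1
      · exact Or.inr ⟨c', k', List.mem_cons_of_mem _ hc', hi', he', hl'⟩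

-- the result is at most any candidate index contributed by lr
theorem pvFold_min (ls : List Char) (lr : List Char) :
    ∀ (p0 : String × Int) (c : Char) (k : Nat), c ∈ lr →
      PySem.List.index? ls c = some k → (pvFold ls lr p0).2 ≤ (k : Int) := by
  induction lr with
  | nil => intro p0 c k hc; cases hc
  | cons c0 lr ih =>
    intro p0 c k hc hi
    rw [pvFold_cons]
    rcases List.mem_cons.mp hc with rfl | hmem
    · rw [hi]
      by_cases hk : (k : Int) < p0.2
      · simp only [if_pos hk]
        exact pvFold_le ls lr _
      · simp only [if_neg hk]
        exact le_trans (pvFold_le ls lr p0) (le_of_not_gt hk)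
    · cases h0 : PySem.List.index? ls c0 with
      | some k0 =>
        by_cases hk0 : (k0 : Int) < p0.2
        · simp only [if_pos hk0]; exact ih _ c k hmem hi
        · simp only [if_neg hk0]; exact ih p0 c k hmem hi
      | none => exact ih p0 c k hmem hi

-- B's membership test is membership in r's characters.
theorem pvContainsOfList (lr : List Char) (c : Char) :
    PySem.Set.contains (PySem.Set.ofList lr) c = decide (c ∈ lr) := by
  by_cases h : c ∈ lr <;> simp [h]

-- ===== VERDICT (by name: the statement is the Claim_ definition above) =====
theorem sttr_spec : Claim_equal_sttr := by
  intro s r _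
  unfold Spec_sttr sttr sttr_alt
  simp only [pvContainsOfList, pvFoldA]
  set ls := s.toList with hls
  set lr := r.toList with hlr
  set u0 : Int := max (PySem.Str.len s) (PySem.Str.len r) + 1 with hu0
  have hlenls : PySem.Str.len s = (ls.length : Int) := by
    simp [hls]
  have hbig : (ls.length : Int) < u0 := by
    rw [hu0, hlenls]
    have := le_max_left (PySem.Str.len s) (PySem.Str.len r)
    rw [hlenls] at this
    omega
  cases hf : ls.find? (fun c => decide (c ∈ lr)) with
  | none =>
    -- no char of s occurs in r: every lookup in A's r-loop misses, v stays ''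
    have hnone : ∀ c ∈ lr, PySem.List.index? ls c = none := by
      intro c hc
      rw [PySem.List.index?_eq_none_iff]
      intro hmem
      have := List.find?_eq_none.mp hf c hmem
      simp [hc] at this
    have hid : pvFold ls lr ("", u0) = ("", u0) := by
      rcases pvFold_cases ls lr ("", u0) with h1 | ⟨c, k, hc, hi, _, _⟩
      · exact h1
      · rw [hnone c hc] at hi; cases hi
    rw [hid]
    simp
  | some c0 =>
    -- c0 = first char of s occurring in r; A's loop ends at exactly (c0, its index)
    rcases List.find?_eq_some_iff_append.mp hf with ⟨hp, as, bs, hdec, hnot⟩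
    have hc0lr : c0 ∈ lr := by simpa using hp
    have hidx : PySem.List.index? ls c0 = some as.length := by
      rw [PySem.List.index?_eq_some_iff]
      refine ⟨as, bs, hdec, rfl, ?_⟩
      intro hmem
      have := hnot c0 hmem
      simp [hc0lr] at this
    have hlen : as.length < ls.length := by rw [hdec]; simp
    have hltu0 : (as.length : Int) < u0 := by
      have : (as.length : Int) < (ls.length : Int) := by exact_mod_cast hlen
      omega
    have hmin : (pvFold ls lr ("", u0)).2 ≤ (as.length : Int) :=
      pvFold_min ls lr ("", u0) c0 as.length hc0lr hidx
    rcases pvFold_cases ls lr ("", u0) with h1 | ⟨c, k, hc, hi, he, _⟩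
    · rw [h1] at hmin
      simp only [] at hmin
      omega
    · rw [he] at hmin
      simp only [] at hmin
      have hkle : k ≤ as.length := by exact_mod_cast hmin
      rcases PySem.List.getElem_of_index?_eq_some hi with ⟨hklt, hgetk, _⟩
      have hkeq : k = as.length := by
        rcases Nat.lt_or_ge k as.length with hlt | hge
        · exfalso
          have h1 : ls[k]? = as[k]? := by
            rw [hdec]; exact List.getElem?_append_left hlt
          have h2 : as[k]? = some ls[k] := by
            rw [← h1]; exact List.getElem?_eq_getElem hklt
          have hmemas : ls[k] ∈ as := List.mem_of_getElem? h2
          have := hnot _ hmemas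
          rw [hgetk] at this
          simp [hc] at this
        · omega
      subst hkeq
      have hceq : c = c0 := by
        have h3 : ls[as.length]? = some c0 := by
          rw [hdec]
          rw [List.getElem?_append_right (le_refl _)]
          simp
        rw [List.getElem?_eq_getElem hklt, hgetk] at h3
        exact (Option.some.inj h3)
      subst hceq
      rw [he]
      simp
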